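-- pv_equiv track=rewrite | github.com/wildlighted/coding | class11/class11.py | char_speech
-- ===== SOURCE A (Python) =====
-- def char_speech(raw_lines):
--     char_all_speech = {}
--     for line in raw_lines[1:]:
--         splitted = line.split(',')
--         if len(splitted) > 3:
--             name = splitted[2]
--             text = ','.join(splitted[3:])
--             text = text[1:]
--             if name in char_all_speech:
--                 char_all_speech[name] = char_all_speech[name] + '\n' + text
--             else:
--                 char_all_speech[name] = text
--     return char_all_speech
-- ===== SOURCE B (Python) =====
-- def char_speech(raw_lines):
--     # Parse every data line into a flat (name, text) pair list.
--     pairs = [(f[2], ','.join(f[3:])[1:])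
--              for f in (line.split(',') for line in raw_lines[1:])
--              if len(f) > 3]
--     # Distinct names in first-occurrence order.
--     seen = set()
--     names = []
--     for n, _ in pairs:
--         if n not in seen:
--             seen.add(n)
--             names.append(n)
--     # For each distinct name, gather its fragments by a filtering scan and join once.
--     return {n: '\n'.join(t for m, t in pairs if m == n) for n in names}
-- ===== Notes on version B (the rewrite author's own statement) =====
-- stated objective: alternative
-- what changed: A's single pass that mutates a dict and repeatedly concatenates strings is replaced by a gather-by-key algorithm: parse all lines to a flat (name, text) pair list, compute the distinct names in first-occurrence order, then for each name scan the pair list with a filter and join its fragments once; no dict accumulation at all.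
import Mathlib
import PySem

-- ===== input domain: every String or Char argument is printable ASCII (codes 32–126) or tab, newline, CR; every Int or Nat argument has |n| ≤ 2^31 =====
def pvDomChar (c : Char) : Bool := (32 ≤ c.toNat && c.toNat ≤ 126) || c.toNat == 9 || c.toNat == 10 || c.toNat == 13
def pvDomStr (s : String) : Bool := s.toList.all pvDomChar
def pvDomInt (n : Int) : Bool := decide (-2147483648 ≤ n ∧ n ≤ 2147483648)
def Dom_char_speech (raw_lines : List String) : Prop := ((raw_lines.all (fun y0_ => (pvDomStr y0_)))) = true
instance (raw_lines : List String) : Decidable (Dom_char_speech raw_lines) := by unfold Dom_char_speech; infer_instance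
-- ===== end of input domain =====

-- B replaces A's dict-accumulating single pass by a gather-by-key algorithm (flat pair list,
-- distinct names in first-occurrence order, then a filtering scan + one join per name);
-- return values proved equal.

-- ===== PORT A =====
def char_speech (raw_lines : List String) : List (String × String) :=
  ((PySem.List.slice raw_lines (some 1) none).foldl
    (fun d line =>
      -- line.split(','): sep "," ≠ "" so split? is always some
      let splitted := (PySem.Str.split? line ",").getD []
      if 3 < splitted.length then
        -- splitted[2]: in range since len(splitted) > 3, so getD "" is exact
        let name := (PySem.List.pyGet? splitted 2).getD ""
        let text := PySem.Str.join "," (PySem.List.slice splitted (some 3) none)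
        let text := PySem.Str.slice text (some 1) none
        if d.contains name then
          d.insert name (d.getD name "" ++ "\n" ++ text)
        else
          d.insert name text
      else d)
    (PySem.Dict.empty : PySem.Dict String String)).items

-- ===== PORT B =====
def char_speech_alt (raw_lines : List String) : List (String × String) :=
  -- flat (name, text) pair list
  let pairs := (PySem.List.slice raw_lines (some 1) none).foldl
    (fun acc line =>
      let f := (PySem.Str.split? line ",").getD []
      if 3 < f.length then
        acc ++ [((PySem.List.pyGet? f 2).getD "",
          PySem.Str.slice (PySem.Str.join "," (PySem.List.slice f (some 3) none)) (some 1) none)]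
      else acc) []
  -- distinct names in first-occurrence order (seen : set, names : list)
  let names := (pairs.foldl
    (fun (st : PySem.Set String × List String) p =>
      if PySem.Set.contains st.1 p.1 then st
      else (PySem.Set.add st.1 p.1, st.2 ++ [p.1]))
    ((PySem.Set.ofList [] : PySem.Set String), ([] : List String))).2
  -- per name: filter the pair list and join once
  names.map (fun n => (n, PySem.Str.join "\n"
    ((pairs.filter (fun q => q.1 == n)).map (fun q => q.2))))

-- ===== PRECONDITION & SPEC =====
def Spec_char_speech (raw_lines : List String) (out : List (String × String)) : Prop := out = char_speech_alt raw_lines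
instance (raw_lines : List String) (out : List (String × String)) : Decidable (Spec_char_speech raw_lines out) := by unfold Spec_char_speech; infer_instance

-- ===== CLAIM =====
def Claim_equal_char_speech : Prop := ∀ (raw_lines : List String), Dom_char_speech raw_lines → Spec_char_speech raw_lines (char_speech raw_lines)

-- ===== LEMMAS AND PROOFS =====

def csParse (line : String) : Option (String × String) :=
  let splitted := (PySem.Str.split? line ",").getD []
  if 3 < splitted.length then
    some ((PySem.List.pyGet? splitted 2).getD "",
      PySem.Str.slice (PySem.Str.join "," (PySem.List.slice splitted (some 3) none)) (some 1) none)
  else none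

def csStepA (d : PySem.Dict String String) (q : String × String) : PySem.Dict String String :=
  if d.contains q.1 then d.insert q.1 (d.getD q.1 "" ++ "\n" ++ q.2) else d.insert q.1 q.2

def csFoldA (lines : List String) (d : PySem.Dict String String) : PySem.Dict String String :=
  lines.foldl (fun d line => (csParse line).elim d (csStepA d)) d

def csPairs (lines : List String) (acc : List (String × String)) : List (String × String) :=
  lines.foldl (fun acc line => acc ++ (csParse line).toList) acc

def csNames (ps : List (String × String)) : PySem.Set String × List String :=
  ps.foldl
    (fun (st : PySem.Set String × List String) p =>
      if PySem.Set.contains st.1 p.1 then st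
      else (PySem.Set.add st.1 p.1, st.2 ++ [p.1]))
    ((PySem.Set.ofList [] : PySem.Set String), ([] : List String))

def csOut (ps : List (String × String)) (n : String) : String × String :=
  (n, PySem.Str.join "\n" ((ps.filter (fun q => q.1 == n)).map (fun q => q.2)))

lemma chars_join_append (sep t : List Char) (v : List (List Char)) (h : v ≠ []) :
    PySem.Chars.join sep (v ++ [t]) = PySem.Chars.join sep v ++ sep ++ t := by
  induction v with
  | nil => exact absurd rfl h
  | cons a w ih =>
    cases w with
    | nil =>
      simp [PySem.Chars.join_cons_cons, PySem.Chars.join_singleton]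
    | cons b w' =>
      have ih' := ih (List.cons_ne_nil b w')
      rw [show ((a :: b :: w') ++ [t] : List (List Char)) = a :: b :: (w' ++ [t]) from by simp]
      rw [PySem.Chars.join_cons_cons sep a b (w' ++ [t]), PySem.Chars.join_cons_cons sep a b w']
      rw [show (b :: (w' ++ [t]) : List (List Char)) = (b :: w') ++ [t] from by simp, ih']
      simp [List.append_assoc]

lemma str_join_singleton (t : String) : PySem.Str.join "\n" [t] = t := by
  rw [← String.toList_inj]
  simp [PySem.Str.toList_join, PySem.Chars.join_singleton]

lemma str_join_append (t : String) (v : List String) (h : v ≠ []) :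
    PySem.Str.join "\n" (v ++ [t]) = PySem.Str.join "\n" v ++ "\n" ++ t := by
  rw [← String.toList_inj]
  simp only [PySem.Str.toList_join, String.toList_append, List.map_append, List.map_cons,
    List.map_nil]
  exact chars_join_append _ _ _ (by simpa using h)

lemma csNames_snoc (ps : List (String × String)) (q : String × String) :
    csNames (ps ++ [q]) =
      if PySem.Set.contains (csNames ps).1 q.1 then csNames ps
      else (PySem.Set.add (csNames ps).1 q.1, (csNames ps).2 ++ [q.1]) := by
  simp [csNames, List.foldl_append]

lemma csNames_fst_eq_snd (ps : List (String × String)) : (csNames ps).1 = (csNames ps).2 := by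
  induction ps using List.reverseRecOn with
  | nil => rfl
  | append_singleton ps q ih =>
    rw [csNames_snoc]
    split
    · exact ih
    · rename_i h
      have hq : q.1 ∉ (csNames ps).2 := by
        intro hm
        exact h (by rw [ih]; exact (PySem.Set.contains_iff _ _).mpr hm)
      simp [PySem.Set.add, ih, hq]

lemma csNames_mem (ps : List (String × String)) (x : String) :
    x ∈ (csNames ps).2 ↔ x ∈ ps.map Prod.fst := by
  induction ps using List.reverseRecOn with
  | nil => simp [csNames]
  | append_singleton ps q ih =>
    rw [csNames_snoc]
    split
    · rename_i h
      rw [csNames_fst_eq_snd] at h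
      have hq : q.1 ∈ (csNames ps).2 := (PySem.Set.contains_iff _ _).mp h
      simp only [List.map_append, List.map_cons, List.map_nil, List.mem_append,
        List.mem_singleton]
      constructor
      · intro hx; exact Or.inl (ih.mp hx)
      · rintro (hx | rfl)
        · exact ih.mpr hx
        · exact hq
    · simp [ih]

lemma csNames_nodup (ps : List (String × String)) : (csNames ps).2.Nodup := by
  induction ps using List.reverseRecOn with
  | nil => simp [csNames]
  | append_singleton ps q ih =>
    rw [csNames_snoc]
    split
    · exact ih
    · rename_i h
      rw [csNames_fst_eq_snd] at h
      have hq : q.1 ∉ (csNames ps).2 := fun hm => h ((PySem.Set.contains_iff _ _).mpr hm)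
      have hdisj : (csNames ps).2.Disjoint [q.1] := by
        intro a ha hb
        rw [List.mem_singleton] at hb
        exact hq (hb ▸ ha)
      exact ih.append (List.nodup_singleton _) hdisj

lemma csOut_snoc_ne (ps : List (String × String)) (q : String × String) (n : String)
    (h : n ≠ q.1) : csOut (ps ++ [q]) n = csOut ps n := by
  have : (q.1 == n) = false := by simp; exact fun e => h e.symm
  simp [csOut, List.filter_append, this]

lemma cs_main (ps : List (String × String)) :
    (ps.foldl csStepA (PySem.Dict.empty : PySem.Dict String String)).items
      = (csNames ps).2.map (csOut ps) := by
  induction ps using List.reverseRecOn with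
  | nil => rfl
  | append_singleton ps q ih =>
    set d := ps.foldl csStepA (PySem.Dict.empty : PySem.Dict String String) with hd
    have hfold : (ps ++ [q]).foldl csStepA (PySem.Dict.empty : PySem.Dict String String)
        = csStepA d q := by simp [List.foldl_append, hd]
    have hkeys : d.keys = (csNames ps).2 := by
      simp only [PySem.Dict.keys, ih, List.map_map]
      rw [show ((fun p : String × String => p.1) ∘ csOut ps) = id from funext fun n => rfl,
        List.map_id]
    have hnd : d.keys.Nodup := by rw [hkeys]; exact csNames_nodup ps
    have hcont : d.contains q.1 = decide (q.1 ∈ (csNames ps).2) := by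
      rw [PySem.Dict.contains_eq_decide_mem_keys, hkeys]
    rw [hfold, csStepA, csNames_snoc, csNames_fst_eq_snd]
    by_cases hmem : q.1 ∈ (csNames ps).2
    · have hc : d.contains q.1 = true := by rw [hcont]; simp [hmem]
      have hsetc : PySem.Set.contains (csNames ps).2 q.1 = true :=
        (PySem.Set.contains_iff _ _).mpr hmem
      rw [if_pos hc, if_pos hsetc, PySem.Dict.items_insert_of_contains d _ hc, ih, List.map_map]
      have hex : q.1 ∈ ps.map Prod.fst := (csNames_mem ps q.1).mp hmem
      have hfil : ps.filter (fun p => p.1 == q.1) ≠ [] := by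
        obtain ⟨p, hp, hpq⟩ := List.mem_map.mp hex
        intro hnil
        have : p ∈ ps.filter (fun p => p.1 == q.1) :=
          List.mem_filter.mpr ⟨hp, by simp [hpq]⟩
        simp [hnil] at this
      have hgetD : d.getD q.1 "" =
          PySem.Str.join "\n" ((ps.filter (fun p => p.1 == q.1)).map (fun p => p.2)) := by
        have hin : (q.1, PySem.Str.join "\n"
            ((ps.filter (fun p => p.1 == q.1)).map (fun p => p.2))) ∈ d.items := by
          rw [ih]
          exact List.mem_map.mpr ⟨q.1, hmem, rfl⟩
        exact PySem.Dict.getD_of_mem_items d hin hnd ""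
      apply List.map_congr_left
      intro n hn
      by_cases hnq : n = q.1
      · subst hnq
        have hmapne : (ps.filter (fun p => p.1 == q.1)).map (fun p => p.2) ≠ [] := by
          simpa using hfil
        have hfq : (ps ++ [q]).filter (fun p => p.1 == q.1)
            = ps.filter (fun p => p.1 == q.1) ++ [q] := by
          simp [List.filter_append]
        simp only [Function.comp_apply, csOut, beq_self_eq_true, if_true]
        rw [hfq, List.map_append, hgetD]
        simp only [List.map_cons, List.map_nil]
        rw [str_join_append q.2 _ hmapne]
      · rw [csOut_snoc_ne ps q n hnq]
        simp [csOut, hnq]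
    · have hc : d.contains q.1 = false := by rw [hcont]; simp [hmem]
      have hsetc : PySem.Set.contains (csNames ps).2 q.1 = false := by
        cases h : PySem.Set.contains (csNames ps).2 q.1
        · rfl
        · exact absurd ((PySem.Set.contains_iff _ _).mp h) hmem
      rw [if_neg (by simp [hc]), if_neg (by simpa using hmem),
        PySem.Dict.items_insert_of_not_contains d _ hc, ih]
      simp only [List.map_append, List.map_cons, List.map_nil]
      congr 1
      · apply List.map_congr_left
        intro n hn
        have hnq : n ≠ q.1 := fun e => hmem (e ▸ hn)
        exact (csOut_snoc_ne ps q n hnq).symm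
      · have hfil : ps.filter (fun p => p.1 == q.1) = [] := by
          rw [List.filter_eq_nil_iff]
          intro p hp hb
          exact hmem ((csNames_mem ps q.1).mpr
            (List.mem_map.mpr ⟨p, hp, by simpa using hb⟩))
        have hfq : (ps ++ [q]).filter (fun p => p.1 == q.1) = [q] := by
          simp [List.filter_append, hfil]
        simp [csOut, hfq, str_join_singleton]

lemma pairs_shift (lines : List String) (acc : List (String × String)) :
    csPairs lines acc = acc ++ csPairs lines [] := by
  induction lines generalizing acc with
  | nil => simp [csPairs]
  | cons line rest ih =>
    rw [show csPairs (line :: rest) acc = csPairs rest (acc ++ (csParse line).toList) from rfl,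
      show csPairs (line :: rest) [] = csPairs rest ([] ++ (csParse line).toList) from rfl,
      ih (acc ++ (csParse line).toList), ih (([] : List (String × String)) ++ (csParse line).toList)]
    simp [List.append_assoc]

lemma csFoldA_eq_foldl_pairs (lines : List String) (d : PySem.Dict String String) :
    csFoldA lines d = (csPairs lines []).foldl csStepA d := by
  induction lines generalizing d with
  | nil => rfl
  | cons line rest ih =>
    rw [show csFoldA (line :: rest) d = csFoldA rest ((csParse line).elim d (csStepA d)) from rfl,
      show csPairs (line :: rest) [] = csPairs rest ([] ++ (csParse line).toList) from rfl,
      List.nil_append, pairs_shift rest, List.foldl_append, ih]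
    cases csParse line <;> rfl

lemma csfold_fun_eq {α β : Type} (f g : α → β → α) (h : ∀ a b, f a b = g a b)
    (init : α) (l : List β) : l.foldl f init = l.foldl g init := by
  have : f = g := funext fun a => funext (h a)
  rw [this]

lemma char_speech_eq_fold (raw_lines : List String) :
    char_speech raw_lines
      = ((csPairs (PySem.List.slice raw_lines (some 1) none) []).foldl csStepA
          (PySem.Dict.empty : PySem.Dict String String)).items := by
  unfold char_speech
  rw [← csFoldA_eq_foldl_pairs]
  unfold csFoldA
  exact congrArg PySem.Dict.items (csfold_fun_eq _ _
    (fun d line => by simp only [csParse]; split <;> rfl) _ _)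

lemma char_speech_alt_eq (raw_lines : List String) :
    char_speech_alt raw_lines
      = (csNames (csPairs (PySem.List.slice raw_lines (some 1) none) [])).2.map
          (csOut (csPairs (PySem.List.slice raw_lines (some 1) none) [])) := by
  unfold char_speech_alt csPairs csNames csOut
  have h1 : (fun (acc : List (String × String)) (line : String) =>
        let f := (PySem.Str.split? line ",").getD []
        if 3 < f.length then
          acc ++ [((PySem.List.pyGet? f 2).getD "",
            PySem.Str.slice (PySem.Str.join "," (PySem.List.slice f (some 3) none)) (some 1) none)]
        else acc)
      = fun acc line => acc ++ (csParse line).toList := by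
    funext acc line
    simp only [csParse]
    split
    · rfl
    · simp
  rw [h1]

-- ===== VERDICT =====
theorem char_speech_spec : Claim_equal_char_speech := by
  intro raw_lines _
  unfold Spec_char_speech
  rw [char_speech_eq_fold, char_speech_alt_eq]
  exact cs_main _
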